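-- pv_equiv track=rewrite | github.com/harrisonized/interview-practice | functions/iterators.py | idx_for_diag_se_from_tr_v1
-- ===== SOURCE A (Python) =====
-- def idx_for_diag_se_from_tr_v1(num_rows=2, num_cols=3):
--     """Traverse southeast diagonals from top right
--     This is the most important variant
--
--     Eg.
--
--      0   -1   -2
--       \\   \\   \\
--     1 ['A', 'B', 'C']
--       \\   \\   \\
--       ['D', 'E', 'F']
--
--     Returns row and col indices for: C, B, F, A, E, D
--
--     Align two strings where col -> str1, row -> str2
--     col: abc    abc     abc
--            | => ||  =>  |
--     row:   ab   ab     ab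
--     """
--
--     # upper right triangle
--     for col in range(num_cols-1, -1, -1):
--         row = 0
--         while row < num_rows and col < num_cols:
--             yield row, col
--             row += 1
--             col += 1
--
--     # lower left triangle
--     for row in range(1, num_rows):
--         col = 0
--         while row < num_rows and col < num_cols:
--             yield row, col
--             row += 1
--             col += 1
-- ===== SOURCE B (Python) =====
-- def idx_for_diag_se_from_tr_v1(num_rows=2, num_cols=3):
--     """Same traversal, but each diagonal's cell range is computed in closed
--     form (no per-cell stepping): iterate the diagonal offset d = col - row
--     from num_cols-1 down to -(num_rows-1) and emit its cells directly."""
--     for d in range(num_cols - 1, -num_rows, -1):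
--         for r in range(max(0, -d), min(num_rows, num_cols - d)):
--             yield r, r + d
-- ===== Notes on version B (the rewrite author's own statement) =====
-- stated objective: simpler
-- what changed: Replaces A's two triangle loops (each stepping row and col cell by cell through a while loop) by a single loop over diagonal offsets d = col - row from num_cols-1 down to -(num_rows-1), emitting each diagonal's cells directly from closed-form range bounds max(0,-d)..min(num_rows, num_cols-d).
import Mathlib
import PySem

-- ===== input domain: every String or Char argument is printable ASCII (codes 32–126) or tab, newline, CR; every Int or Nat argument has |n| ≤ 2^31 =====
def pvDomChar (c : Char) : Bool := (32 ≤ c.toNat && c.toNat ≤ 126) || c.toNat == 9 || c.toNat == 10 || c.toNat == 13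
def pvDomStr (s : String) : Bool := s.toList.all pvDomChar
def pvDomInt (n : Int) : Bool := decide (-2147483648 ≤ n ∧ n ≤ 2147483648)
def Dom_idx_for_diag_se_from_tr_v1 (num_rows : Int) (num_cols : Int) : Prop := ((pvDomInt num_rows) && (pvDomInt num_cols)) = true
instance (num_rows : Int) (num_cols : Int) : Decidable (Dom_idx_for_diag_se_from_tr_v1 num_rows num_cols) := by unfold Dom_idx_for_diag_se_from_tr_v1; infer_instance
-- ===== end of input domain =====

-- B replaces A's two triangle loops with per-cell stepping by a single loop over
-- diagonal offsets whose cell range is computed in closed form (objective: simpler).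

-- ===== PORT A =====
-- the inner 'while row < num_rows and col < num_cols: yield row, col; row += 1; col += 1'
def pvWalk (num_rows : Int) (num_cols : Int) (row : Int) (col : Int) : List (Int × Int) :=
  if _h : row < num_rows ∧ col < num_cols then
    (row, col) :: pvWalk num_rows num_cols (row + 1) (col + 1)
  else []
termination_by (num_rows - row).toNat
decreasing_by omega

def idx_for_diag_se_from_tr_v1 (num_rows : Int) (num_cols : Int) : List (Int × Int) :=
  -- lower left triangle loop 'for row in range(1, num_rows)', started from the
  -- output of the upper-right-triangle loop 'for col in range(num_cols-1, -1, -1)'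
  (PySem.List.pyRange 1 num_rows 1).foldl
    (fun acc row => acc ++ pvWalk num_rows num_cols row 0)
    ((PySem.List.pyRange (num_cols - 1) (-1) (-1)).foldl
      (fun acc col => acc ++ pvWalk num_rows num_cols 0 col) [])

-- ===== PORT B =====
def idx_for_diag_se_from_tr_v1_alt (num_rows : Int) (num_cols : Int) : List (Int × Int) :=
  (PySem.List.pyRange (num_cols - 1) (-num_rows) (-1)).flatMap (fun d =>
    (PySem.List.pyRange (max 0 (-d)) (min num_rows (num_cols - d)) 1).map (fun r => (r, r + d)))

-- ===== PRECONDITION & SPEC =====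
def Spec_idx_for_diag_se_from_tr_v1 (num_rows : Int) (num_cols : Int) (out : List (Int × Int)) : Prop := out = idx_for_diag_se_from_tr_v1_alt num_rows num_cols
instance (num_rows : Int) (num_cols : Int) (out : List (Int × Int)) : Decidable (Spec_idx_for_diag_se_from_tr_v1 num_rows num_cols out) := by unfold Spec_idx_for_diag_se_from_tr_v1; infer_instance

-- ===== CLAIM (what is proved, stated in full; the proofs are below) =====
def Claim_equal_idx_for_diag_se_from_tr_v1 : Prop := ∀ (num_rows : Int) (num_cols : Int), Dom_idx_for_diag_se_from_tr_v1 num_rows num_cols → Spec_idx_for_diag_se_from_tr_v1 num_rows num_cols (idx_for_diag_se_from_tr_v1 num_rows num_cols)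

-- ===== LEMMAS AND PROOFS =====

-- one southeast diagonal of offset d = col - row, in increasing-row order
def pvDiag (R C d : Int) : List (Int × Int) :=
  (PySem.List.pyRange (max 0 (-d)) (min R (C - d)) 1).map (fun r => (r, r + d))

theorem pvDiag_eq_nil (R C d : Int) (h : min R (C - d) ≤ max 0 (-d)) : pvDiag R C d = [] := by
  unfold pvDiag
  rw [PySem.List.pyRange_one_eq_nil h]
  rfl

theorem pvWalk_eq (R C : Int) : ∀ (n : ℕ) (row col : Int), (R - row).toNat = n →
    pvWalk R C row col
      = (PySem.List.pyRange row (min R (C - col + row)) 1).map (fun r => (r, r + (col - row))) := by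
  intro n
  induction n with
  | zero =>
    intro row col hn
    rw [pvWalk]
    rw [dif_neg (by omega)]
    rw [PySem.List.pyRange_one_eq_nil (by omega)]
    rfl
  | succ n ih =>
    intro row col hn
    rw [pvWalk]
    by_cases h : row < R ∧ col < C
    · rw [dif_pos h]
      have hcons : PySem.List.pyRange row (min R (C - col + row)) 1
          = row :: PySem.List.pyRange (row + 1) (min R (C - col + row)) 1 :=
        PySem.List.pyRange_one_cons (by omega)
      rw [hcons, List.map_cons]
      congr 1
      · have e : row + (col - row) = col := by ring
        rw [e]
      · rw [ih (row + 1) (col + 1) (by omega)]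
        have e1 : C - (col + 1) + (row + 1) = C - col + row := by ring
        rw [e1]
        apply List.map_congr_left
        intro r _
        have e2 : r + (col + 1 - (row + 1)) = r + (col - row) := by ring
        rw [e2]
    · rw [dif_neg h]
      rw [PySem.List.pyRange_one_eq_nil (by omega)]
      rfl

theorem pvWalk_upper (R C col : Int) (h : 0 ≤ col) : pvWalk R C 0 col = pvDiag R C col := by
  rw [pvWalk_eq R C (R - 0).toNat 0 col rfl]
  unfold pvDiag
  have e1 : C - col + 0 = C - col := by ring
  have e2 : max 0 (-col) = 0 := by omega
  have e3 : (fun r : Int => (r, r + (col - 0))) = (fun r : Int => (r, r + col)) := by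
    funext r
    have : r + (col - 0) = r + col := by ring
    rw [this]
  rw [e1, e2, e3]

theorem pvWalk_lower (R C row : Int) (h : 0 ≤ row) : pvWalk R C row 0 = pvDiag R C (-row) := by
  rw [pvWalk_eq R C (R - row).toNat row 0 rfl]
  unfold pvDiag
  have e1 : C - 0 + row = C - -row := by ring
  have e2 : max 0 (- -row) = row := by omega
  have e3 : (fun r : Int => (r, r + (0 - row))) = (fun r : Int => (r, r + -row)) := by
    funext r
    have : r + (0 - row) = r + -row := by ring
    rw [this]
  rw [e1, e2, e3]

theorem pvB_eq_flatMap (R C : Int) :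
    idx_for_diag_se_from_tr_v1_alt R C
      = (PySem.List.pyRange (C - 1) (-R) (-1)).flatMap (fun d => pvDiag R C d) := rfl

theorem pvA_eq_flatMap (R C : Int) :
    idx_for_diag_se_from_tr_v1 R C
      = (PySem.List.pyRange (C - 1) (-1) (-1)).flatMap (fun d => pvDiag R C d)
        ++ (PySem.List.pyRange 1 R 1).flatMap (fun row => pvDiag R C (-row)) := by
  unfold idx_for_diag_se_from_tr_v1
  have hu : (PySem.List.pyRange (C - 1) (-1) (-1)).foldl
        (fun acc col => acc ++ pvWalk R C 0 col) []
      = (PySem.List.pyRange (C - 1) (-1) (-1)).foldl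
        (fun acc col => acc ++ pvDiag R C col) [] := by
    apply PySem.List.foldl_congr_mem'
    intro col hcol acc
    rw [pvWalk_upper R C col (by have := (PySem.List.mem_pyRange_neg_one.mp hcol).1; omega)]
  have hl : ∀ init : List (Int × Int), (PySem.List.pyRange 1 R 1).foldl
        (fun acc row => acc ++ pvWalk R C row 0) init
      = (PySem.List.pyRange 1 R 1).foldl
        (fun acc row => acc ++ pvDiag R C (-row)) init := by
    intro init
    apply PySem.List.foldl_congr_mem'
    intro row hrow acc
    rw [pvWalk_lower R C row (by have := (PySem.List.mem_pyRange_one.mp hrow).1; omega)]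
  rw [hu, hl]
  rw [PySem.List.foldl_append_eq_flatMap, PySem.List.foldl_append_eq_flatMap]
  simp

theorem pvNegRange (R : Int) :
    PySem.List.pyRange (-1) (-R) (-1) = (PySem.List.pyRange 1 R 1).map (fun r => -r) := by
  rw [PySem.List.pyRange_neg_one, PySem.List.pyRange_one]
  rw [List.map_map]
  have e : (-1 - (-R)).toNat = (R - 1).toNat := by omega
  rw [e]
  apply List.map_congr_left
  intro k _
  simp only [Function.comp_apply]
  ring

theorem idx_for_diag_se_from_tr_v1_spec' (R C : Int) :
    idx_for_diag_se_from_tr_v1 R C = idx_for_diag_se_from_tr_v1_alt R C := by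
  rw [pvA_eq_flatMap, pvB_eq_flatMap]
  by_cases hmain : 1 ≤ R ∧ 1 ≤ C
  · -- main case: split B's diagonal range at d = 0
    have hsplit : PySem.List.pyRange (C - 1) (-R) (-1)
        = PySem.List.pyRange (C - 1) (-1) (-1) ++ PySem.List.pyRange (-1) (-R) (-1) := by
      rw [PySem.List.pyRange_neg_one_eq_reverse (a := C - 1) (b := -R)]
      rw [PySem.List.pyRange_neg_one_eq_reverse (a := C - 1) (b := -1)]
      rw [PySem.List.pyRange_neg_one_eq_reverse (a := -1) (b := -R)]
      rw [PySem.List.pyRange_one_append (-R + 1) 0 (C - 1 + 1) (by omega) (by omega)]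
      rw [List.reverse_append]
      have e1 : (-1 : Int) + 1 = 0 := by ring
      rw [e1]
    rw [hsplit, List.flatMap_append, pvNegRange]
    rw [List.flatMap_map]
  · -- degenerate case: every diagonal is empty
    have hnil : ∀ d : Int, d ∈ PySem.List.pyRange (C - 1) (-R) (-1) ∨
        d ∈ PySem.List.pyRange (C - 1) (-1) (-1) ∨ (∃ row ∈ PySem.List.pyRange 1 R 1, d = -row) →
        pvDiag R C d = [] := by
      intro d hd
      apply pvDiag_eq_nil
      rcases hd with h | h | ⟨row, hrow, rfl⟩
      · have := PySem.List.mem_pyRange_neg_one.mp h; omega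
      · have := PySem.List.mem_pyRange_neg_one.mp h; omega
      · have := PySem.List.mem_pyRange_one.mp hrow; omega
    have h1 : (PySem.List.pyRange (C - 1) (-R) (-1)).flatMap (fun d => pvDiag R C d) = [] := by
      apply List.flatMap_eq_nil_iff.mpr
      intro d hd; exact hnil d (Or.inl hd)
    have h2 : (PySem.List.pyRange (C - 1) (-1) (-1)).flatMap (fun d => pvDiag R C d) = [] := by
      apply List.flatMap_eq_nil_iff.mpr
      intro d hd; exact hnil d (Or.inr (Or.inl hd))
    have h3 : (PySem.List.pyRange 1 R 1).flatMap (fun row => pvDiag R C (-row)) = [] := by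
      apply List.flatMap_eq_nil_iff.mpr
      intro row hrow; exact hnil (-row) (Or.inr (Or.inr ⟨row, hrow, rfl⟩))
    rw [h1, h2, h3]
    rfl

-- ===== VERDICT (by name: the statement is the Claim_ definition above) =====
theorem idx_for_diag_se_from_tr_v1_spec : Claim_equal_idx_for_diag_se_from_tr_v1 := by
  intro R C _
  unfold Spec_idx_for_diag_se_from_tr_v1
  exact idx_for_diag_se_from_tr_v1_spec' R C
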